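-- pv_equiv track=rewrite | github.com/Dawnsawnn/TP2_IFT3295 | plast.py | index_kmers
-- ===== SOURCE A (Python) =====
-- from collections import defaultdict
-- from typing import Dict, List, Tuple
--
-- def index_kmers(seq: str, k: int) -> Dict[str, List[int]]:
--     """
--     Construit un index des k-mers d'une séquence.
--     Retourne un dict : kmer -> liste des positions de début (0-based).
--     """
--     index: Dict[str, List[int]] = defaultdict(list)
--     n = len(seq)
--
--     if k > n:
--         return {}  # pas de k-mers possibles plus long que la sequence
--
--     for i in range(n - k + 1):
--         kmer = seq[i:i + k]
--         index[kmer].append(i)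
--
--     # On peut garder defaultdict ou le convertir en dict normal :
--     return dict(index)
-- ===== SOURCE B (Python) =====
-- def index_kmers(seq: str, k: int):
--     """
--     Construit un index des k-mers d'une séquence.
--     Retourne un dict : kmer -> liste des positions de début (0-based).
--     Two-phase: materialise the window list once, dedup the keys in first-occurrence
--     order, then collect each key's positions by scanning the window list.
--     """
--     n = len(seq)
--     if k > n:
--         return {}
--     kmers = [seq[i:i + k] for i in range(n - k + 1)]
--     return {km: [i for i, x in enumerate(kmers) if x == km]
--             for km in dict.fromkeys(kmers)}
-- ===== Notes on version B (the rewrite author's own statement) =====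
-- stated objective: alternative
-- what changed: Replaces the single-pass defaultdict accumulation by a two-phase decomposition: materialise the list of k-mer windows once, dedup the keys in first-occurrence order with dict.fromkeys, then build each key's position list by an enumerate-scan of the window list.
import Mathlib
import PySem

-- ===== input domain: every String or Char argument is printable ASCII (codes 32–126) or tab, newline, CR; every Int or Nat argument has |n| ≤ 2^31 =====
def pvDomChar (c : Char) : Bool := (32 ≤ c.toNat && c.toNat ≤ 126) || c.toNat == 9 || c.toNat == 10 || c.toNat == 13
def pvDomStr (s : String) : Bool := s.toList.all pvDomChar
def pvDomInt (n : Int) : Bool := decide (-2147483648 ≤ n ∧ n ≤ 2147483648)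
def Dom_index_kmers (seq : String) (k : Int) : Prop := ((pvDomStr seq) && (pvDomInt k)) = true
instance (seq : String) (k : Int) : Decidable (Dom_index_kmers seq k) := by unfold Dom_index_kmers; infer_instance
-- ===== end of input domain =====

-- B replaces the defaultdict accumulation by a window list + ordered key dedup + per-key
-- position scans (alternative decomposition, same results; not claimed faster).


-- ===== PORT A =====
def index_kmers (seq : String) (k : Int) : List (String × List Int) :=
  let n : Int := PySem.Str.len seq
  if k > n then []
  else
    (List.foldl
      (fun d i =>
        PySem.Dict.modify d (PySem.Str.slice seq (some i) (some (i + k))) []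
          (fun v => v ++ [i]))
      PySem.Dict.empty (PySem.List.pyRange 0 (n - k + 1))).items

-- ===== PORT B =====
def index_kmers_alt (seq : String) (k : Int) : List (String × List Int) :=
  let n : Int := PySem.Str.len seq
  if k > n then []
  else
    let kmers : List String :=
      (PySem.List.pyRange 0 (n - k + 1)).map
        (fun i => PySem.Str.slice seq (some i) (some (i + k)))
    (List.foldl
      (fun d km =>
        PySem.Dict.insert d km
          (((PySem.List.enumerate kmers).filter (fun p => p.2 == km)).map (fun p => p.1)))
      PySem.Dict.empty (PySem.List.dedup kmers)).items

-- ===== PRECONDITION & SPEC =====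
def Spec_index_kmers (seq : String) (k : Int) (out : List (String × List Int)) : Prop := out = index_kmers_alt seq k
instance (seq : String) (k : Int) (out : List (String × List Int)) : Decidable (Spec_index_kmers seq k out) := by unfold Spec_index_kmers; infer_instance

-- ===== CLAIM (what is proved, stated in full; the proofs are below) =====
def Claim_equal_index_kmers : Prop := ∀ (seq : String) (k : Int), Dom_index_kmers seq k → Spec_index_kmers seq k (index_kmers seq k)

-- ===== LEMMAS AND PROOFS =====

-- enumerate of a list built by mapping over range(0, m) pairs each index with its image
lemma pv_enum_map_range {α : Type} (f : Int → α) (m : Nat) :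
    PySem.List.enumerate ((PySem.List.pyRange 0 (m : Int)).map f)
      = (PySem.List.pyRange 0 (m : Int)).map (fun i => (i, f i)) := by
  induction m with
  | zero => rfl
  | succ m ih =>
    have hcast : ((m + 1 : Nat) : Int) = (m : Int) + 1 := by push_cast; ring
    have hlen : ((PySem.List.pyRange 0 (m : Int)).map f).length = m := by
      simp [PySem.List.pyRange_zero_natCast]
    rw [hcast, PySem.List.pyRange_one_succ_right (by exact_mod_cast Nat.zero_le m),
      List.map_append, List.map_append, PySem.List.enumerate_append, ih, hlen]
    simp [PySem.List.enumerate]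

-- the per-key position lists of the two ports agree
lemma pv_values_agree (f : Int → String) (m : Nat) (km : String) :
    (((PySem.List.pyRange 0 (m : Int)).map (fun i => (f i, i))).filter
        (fun p => p.1 == km)).map (fun p => p.2)
      = (((PySem.List.enumerate ((PySem.List.pyRange 0 (m : Int)).map f)).filter
          (fun p => p.2 == km)).map (fun p => p.1)) := by
  rw [pv_enum_map_range]
  simp [List.filter_map, List.map_map, Function.comp_def]

-- ===== VERDICT (by name: the statement is the Claim_ definition above) =====
theorem index_kmers_spec : Claim_equal_index_kmers := by
  intro seq k _
  unfold Spec_index_kmers index_kmers index_kmers_alt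
  simp only []
  set n : Int := PySem.Str.len seq with hn
  by_cases hk : k > n
  · simp [hk]
  · simp only [if_neg hk]
    set f : Int → String := fun i => PySem.Str.slice seq (some i) (some (i + k)) with hf
    set L : List Int := PySem.List.pyRange 0 (n - k + 1) with hL
    set kmers : List String := L.map f with hkmers
    -- A's dictionary
    set dA := List.foldl
      (fun d i => PySem.Dict.modify d (f i) [] (fun v => v ++ [i]))
      PySem.Dict.empty L with hdA
    -- A's keys are the distinct k-mers in first-occurrence order
    have hkeys : dA.keys = PySem.List.dedup kmers := by
      rw [hdA, PySem.Dict.keys_foldl_modify_key L f [] (fun _ i => fun v => v ++ [i]),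
        PySem.List.dedup_eq_ofList]
      simp [PySem.Dict.keys_empty]
      rfl
    have hnodup : dA.keys.Nodup := by
      rw [hdA]
      exact PySem.Dict.nodup_keys_foldl_modify_key L f [] (fun _ i => fun v => v ++ [i])
        PySem.Dict.empty (by simp [PySem.Dict.keys_empty])
    -- A's stored list at each key
    have hgetD : ∀ km, dA.getD km []
        = ((L.map (fun i => (f i, i))).filter (fun p => p.1 == km)).map (fun p => p.2) := by
      intro km
      have hshift : dA = List.foldl
          (fun d p => PySem.Dict.modify d p.1 [] (fun v => v ++ [p.2]))
          PySem.Dict.empty (L.map (fun i => (f i, i))) := by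
        rw [hdA, List.foldl_map]
      rw [hshift, PySem.Dict.getD_foldl_modify_append]
      simp [PySem.Dict.getD_empty]
    -- B's dictionary: inserting distinct fresh keys appends
    have hB : (List.foldl
        (fun d km => PySem.Dict.insert d km
          (((PySem.List.enumerate kmers).filter (fun p => p.2 == km)).map (fun p => p.1)))
        PySem.Dict.empty (PySem.List.dedup kmers)).items
        = (PySem.List.dedup kmers).map (fun km =>
            (km, ((PySem.List.enumerate kmers).filter (fun p => p.2 == km)).map (fun p => p.1))) := by
      have := PySem.Dict.items_foldl_insert_fresh (PySem.List.dedup kmers)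
        (fun km => km)
        (fun km => ((PySem.List.enumerate kmers).filter (fun p => p.2 == km)).map (fun p => p.1))
        PySem.Dict.empty
        (fun a _ => PySem.Dict.contains_empty a)
        (by simp)
      simpa using this
    rw [hB, PySem.Dict.items_eq_map_keys dA hnodup [], hkeys]
    apply List.map_congr_left
    intro km _
    have hm : ∃ m : Nat, n - k + 1 = (m : Int) := ⟨(n - k + 1).toNat, by omega⟩
    obtain ⟨m, hmeq⟩ := hm
    rw [hgetD km, hkmers, hL, hmeq]
    exact congrArg (Prod.mk km) (pv_values_agree f m km)
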